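-- pv_equiv track=rewrite | github.com/houxizhu/leetcode | codeforces/1003.div4/c2.skibidus-and-fanum-tax-hard-version.py | codeforces
-- ===== SOURCE A (Python) =====
-- def codeforces(n: int, m: int, a: [], b: []):
--     lla = len(a)
--     llb = len(b)
--     b.sort()
--     a[0] = min(a[0], b[0]-a[0])
--     for ii in range(1, lla):
--         if max(a[ii], b[-1]-a[ii]) < a[ii-1]:
--             return "no"
--         for jj in range(llb):
--             if min(a[ii], b[jj]-a[ii]) >= a[ii-1]:
--                 a[ii] = min(a[ii], b[jj]-a[ii])
--                 break
--             # else: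
--             #     a[ii] = max(a[ii], b[jj]-a[ii])
--     if n >= 2 and a[-1] < a[-2]:
--         if max(a[-1], b[-1]-a[-1]) < a[-2]:
--             return "no"
--
--     return "yes"
-- ===== SOURCE B (Python) =====
-- # Same decision procedure, but the inner linear scan over b is replaced by a hand-written
-- # binary search on the sorted b, and the in-place mutation of a by a two-variable state.
-- # Return-value equivalence only: unlike A, this does not sort b in place nor mutate a.
-- def codeforces(n: int, m: int, a: [], b: []):
--     bs = sorted(b)
--     bmax = bs[-1]
--     prev2 = prev = min(a[0], bs[0] - a[0])
--     for x in a[1:]: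
--         if max(x, bmax - x) < prev:
--             return "no"
--         if x >= prev:
--             key = prev + x
--             lo, hi = 0, len(bs)
--             while lo < hi:
--                 mid = (lo + hi) // 2
--                 if bs[mid] < key:
--                     lo = mid + 1
--                 else:
--                     hi = mid
--             nxt = min(x, bs[lo] - x) if lo < len(bs) else x
--         else:
--             nxt = x
--         prev2, prev = prev, nxt
--     if n >= 2 and prev < prev2:
--         if max(prev, bmax - prev) < prev2:
--             return "no"
--     return "yes"
-- ===== Notes on version B (the rewrite author's own statement) =====
-- stated objective: faster
-- what changed: A's inner linear scan over all of sorted b for the first usable b[jj] is replaced by a hand-written binary search (first b[j] >= prev + a[i]), and A's in-place mutation of a by a two-variable running state (prev2, prev).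
import Mathlib
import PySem

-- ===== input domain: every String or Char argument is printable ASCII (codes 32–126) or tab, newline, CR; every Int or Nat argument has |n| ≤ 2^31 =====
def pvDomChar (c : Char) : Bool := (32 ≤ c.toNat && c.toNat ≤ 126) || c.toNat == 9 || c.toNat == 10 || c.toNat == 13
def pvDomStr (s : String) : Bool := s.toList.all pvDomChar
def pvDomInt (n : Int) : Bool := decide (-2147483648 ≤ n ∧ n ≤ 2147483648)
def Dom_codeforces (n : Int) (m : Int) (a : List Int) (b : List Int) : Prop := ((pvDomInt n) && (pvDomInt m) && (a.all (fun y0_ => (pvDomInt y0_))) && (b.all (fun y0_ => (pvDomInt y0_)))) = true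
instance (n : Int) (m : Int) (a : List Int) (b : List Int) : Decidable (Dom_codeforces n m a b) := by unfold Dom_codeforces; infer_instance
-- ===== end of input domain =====

-- B replaces A's inner linear scan over all of b by a hand-written binary search on the
-- sorted b, and A's in-place mutation of a by a two-variable running state.
-- A mutates its arguments (sorts b in place, overwrites entries of a); B does not:
-- the equivalence proved here is about the RETURN value only.

-- ===== PORT A =====
-- b[-1] (used only on nonempty lists; default never reached inside Pre_)
def lastA (xs : List Int) : Int := (PySem.List.pyGet? xs (-1)).getD 0

-- inner 'for jj in range(llb): if min(a[ii], b[jj]-a[ii]) >= a[ii-1]: a[ii] = …; break'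
def innerA (bs : List Int) (prev ai : Int) : Int :=
  match bs with
  | [] => ai
  | bj :: rest => if prev ≤ min ai (bj - ai) then min ai (bj - ai) else innerA rest prev ai

-- outer 'for ii in range(1, lla)': carries (a[ii-2], a[ii-1]) of the mutated array;
-- none = the early 'return "no"'
def loopA (bs : List Int) (bmax : Int) : Int → Int → List Int → Option (Int × Int)
  | _p2, p, [] => some (_p2, p)
  | _p2, p, ai :: rest =>
      if max ai (bmax - ai) < p then none
      else loopA bs bmax p (innerA bs p ai) rest

def codeforces (n : Int) (m : Int) (a : List Int) (b : List Int) : String :=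
  let bs := PySem.List.sorted b (fun x => x) false
  match a, bs with
  | a0 :: arest, b0 :: _ =>
      let bmax := lastA bs
      let a0' := min a0 (b0 - a0)
      match loopA bs bmax a0' a0' arest with
      | none => "no"
      | some (p2, p) =>
          if 2 ≤ n ∧ p < p2 then (if max p (bmax - p) < p2 then "no" else "yes")
          else "yes"
  | _, _ => ""   -- Python raises IndexError here (a or b empty): outside Pre_

-- ===== PORT B =====
-- the hand-written 'while lo < hi' binary search of Source B (bs[mid] is always in range at
-- every call with 0 ≤ lo, hi ≤ len bs, so the pyGetD default is never reached)
def bisectLoop (bs : List Int) (key : Int) (lo hi : Int) : Int :=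
  if lo < hi then
    let mid := PySem.Int.floordiv (lo + hi) 2
    if PySem.List.pyGetD bs mid 0 < key then bisectLoop bs key (mid + 1) hi
    else bisectLoop bs key lo mid
  else lo
termination_by (hi - lo).toNat
decreasing_by
  · have h1 := PySem.Int.floordiv_two_mid_bounds (by omega : lo ≤ hi)
    omega
  · have h1 := PySem.Int.floordiv_two_mid_bounds (by omega : lo ≤ hi)
    have h2 : PySem.Int.floordiv (lo + hi) 2 < hi :=
      (PySem.Int.floordiv_lt_iff_lt_mul (by omega)).2 (by omega)
    omega

-- body of Source B's loop: the next value of prev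
def altStep (bs : List Int) (prev x : Int) : Int :=
  if prev ≤ x then
    let lo := bisectLoop bs (prev + x) 0 (bs.length : Int)
    if lo < (bs.length : Int) then min x (PySem.List.pyGetD bs lo 0 - x) else x
  else x

-- one step of Source B's for-loop on the state (prev2, prev); none = already returned "no"
def altAcc (bs : List Int) (bmax : Int) (st : Option (Int × Int)) (x : Int) : Option (Int × Int) :=
  if st.isNone then none
  else
    let p := (st.getD (0, 0)).2
    if max x (bmax - x) < p then none else some (p, altStep bs p x)

def codeforces_alt (n : Int) (m : Int) (a : List Int) (b : List Int) : String :=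
  let bs := PySem.List.sorted b (fun x => x) false
  if a.isEmpty || bs.isEmpty then ""   -- a[0] / bs[0] raises IndexError: outside Pre_
  else
    let bmax := (PySem.List.pyGet? bs (-1)).getD 0
    let a0 := a.headD 0
    let p0 := min a0 (bs.headD 0 - a0)
    let res := (a.drop 1).foldl (altAcc bs bmax) (some (p0, p0))
    res.elim "no" (fun pr =>
      if 2 ≤ n ∧ pr.2 < pr.1 then (if max pr.2 (bmax - pr.2) < pr.1 then "no" else "yes")
      else "yes")

-- ===== PRECONDITION & SPEC =====
-- Python A raises IndexError on empty a or empty b (a[0], b[0]), and on n ≥ 2 with a of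
-- length 1 (a[-2] in the final check); exactly those inputs are excluded.
def Pre_codeforces (n : Int) (m : Int) (a : List Int) (b : List Int) : Prop :=
  a ≠ [] ∧ b ≠ [] ∧ (2 ≤ n → 2 ≤ (a.length : Int))
instance (n : Int) (m : Int) (a : List Int) (b : List Int) : Decidable (Pre_codeforces n m a b) := by unfold Pre_codeforces; infer_instance

def pvWitness_codeforces : Int × Int × List Int × List Int := (2, 1, [1, 2], [3])

def Spec_codeforces (n : Int) (m : Int) (a : List Int) (b : List Int) (out : String) : Prop := out = codeforces_alt n m a b
instance (n : Int) (m : Int) (a : List Int) (b : List Int) (out : String) : Decidable (Spec_codeforces n m a b out) := by unfold Spec_codeforces; infer_instance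

-- ===== CLAIM (what is proved, stated in full; the proofs are below) =====
def Claim_equal_codeforces : Prop := ∀ (n : Int) (m : Int) (a : List Int) (b : List Int), Dom_codeforces n m a b → Pre_codeforces n m a b → Spec_codeforces n m a b (codeforces n m a b)

-- ===== LEMMAS AND PROOFS =====

-- A's inner scan, characterised by the first index of sorted b with key ≤ bs[j]
theorem innerA_eq_findIdx (bs : List Int) (prev x : Int) :
    innerA bs prev x =
      if h : prev ≤ x ∧ bs.findIdx (fun v => decide (prev + x ≤ v)) < bs.length then
        min x (bs[bs.findIdx (fun v => decide (prev + x ≤ v))] - x)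
      else x := by
  induction bs with
  | nil => simp [innerA]
  | cons bj rest ih =>
      by_cases hx : prev ≤ x
      · by_cases hb : prev + x ≤ bj
        · have hc : prev ≤ min x (bj - x) := le_min hx (by omega)
          have hd : (decide (prev + x ≤ bj)) = true := by simp [hb]
          simp only [innerA, if_pos hc, List.findIdx_cons, hd, cond_true]
          rw [dif_pos ⟨hx, by simp⟩]
          simp
        · have hc : ¬ prev ≤ min x (bj - x) := by
            have h1 := min_le_right x (bj - x); omega
          have hd : (decide (prev + x ≤ bj)) = false := by simp; omega
          simp only [innerA, if_neg hc, ih, List.findIdx_cons, hd, cond_false,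
                     List.length_cons, List.getElem_cons_succ]
          by_cases hlt : rest.findIdx (fun v => decide (prev + x ≤ v)) < rest.length
          · rw [dif_pos ⟨hx, hlt⟩, dif_pos ⟨hx, by omega⟩]
          · rw [dif_neg (by tauto), dif_neg (by intro h; exact hlt (by omega))]
      · have hc : ¬ prev ≤ min x (bj - x) := by
          have h1 := min_le_left x (bj - x); omega
        simp only [innerA, if_neg hc, ih]
        rw [dif_neg (by tauto), dif_neg (by tauto)]

-- sorted list: entries are monotone in the index
theorem sorted_mono {bs : List Int} (hs : bs.Pairwise (· ≤ ·)) {i j : Nat}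
    (hij : i ≤ j) (hj : j < bs.length) : bs[i]'(by omega) ≤ bs[j] := by
  rcases Nat.lt_or_ge i j with h | h
  · exact (List.pairwise_iff_getElem.1 hs) i j (by omega) hj h
  · have : i = j := by omega
    subst this; exact le_refl _

-- the binary-search loop lands exactly on findIdx, given bracketing invariants
theorem bisectLoop_eq_findIdx (bs : List Int) (hs : bs.Pairwise (· ≤ ·)) (key : Int) :
    ∀ (N : Nat) (lo hi : Int), (hi - lo).toNat ≤ N →
      0 ≤ lo → hi ≤ (bs.length : Int) → lo ≤ hi →
      lo ≤ (bs.findIdx (fun v => decide (key ≤ v)) : Int) →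
      ((bs.findIdx (fun v => decide (key ≤ v)) : Int) ≤ hi) →
      bisectLoop bs key lo hi = (bs.findIdx (fun v => decide (key ≤ v)) : Int) := by
  intro N
  induction N with
  | zero =>
      intro lo hi hN h0 hlen hlh hlo hhi
      have : ¬ lo < hi := by omega
      rw [bisectLoop, if_neg this]; omega
  | succ N ih =>
      intro lo hi hN h0 hlen hlh hlo hhi
      rw [bisectLoop]
      by_cases hlt : lo < hi
      · rw [if_pos hlt]
        set fi := bs.findIdx (fun v => decide (key ≤ v)) with hfi
        have hmid := PySem.Int.floordiv_two_mid_bounds (le_of_lt hlt)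
        have hmidhi : PySem.Int.floordiv (lo + hi) 2 < hi :=
          (PySem.Int.floordiv_lt_iff_lt_mul (by omega)).2 (by omega)
        set mid := PySem.Int.floordiv (lo + hi) 2 with hm
        have hmrange : 0 ≤ mid ∧ mid < (bs.length : Int) := by omega
        have hmn : mid = ((mid.toNat : Nat) : Int) := by omega
        have hmlen : mid.toNat < bs.length := by omega
        have hget : PySem.List.pyGetD bs mid 0 = bs[mid.toNat] := by
          have h0 : (0:Int) ≤ mid := by omega
          have h1 : mid < (bs.length : Int) := by omega
          exact PySem.List.pyGetD_eq_getElem bs 0 h0 h1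
        by_cases hk : bs[mid.toNat] < key
        · -- bs[mid] < key ⇒ mid < fi
          rw [if_pos (by rw [hget]; exact hk)]
          have hfi_gt : mid < (fi : Int) := by
            by_contra hc
            have hfilen : fi < bs.length := by omega
            have h1 : key ≤ bs[fi] := by
              have := @List.findIdx_getElem _ (fun v => decide (key ≤ v)) bs hfilen
              simpa using this
            have h2 : bs[fi] ≤ bs[mid.toNat] := sorted_mono hs (by omega) hmlen
            omega
          exact ih (mid + 1) hi (by omega) (by omega) hlen (by omega) (by omega) hhi
        · -- key ≤ bs[mid] ⇒ fi ≤ mid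
          rw [if_neg (by rw [hget]; exact hk)]
          have hfi_le : (fi : Int) ≤ mid := by
            by_contra hc
            have : mid.toNat < fi := by omega
            have := @List.not_of_lt_findIdx _ (fun v => decide (key ≤ v)) bs mid.toNat this
            simp at this
            omega
          exact ih lo mid (by omega) h0 (by omega) (by omega) hlo hfi_le
      · rw [if_neg hlt]; omega

-- hence B's step equals A's inner scan on the sorted list
theorem altStep_eq_innerA (bs : List Int) (hs : bs.Pairwise (· ≤ ·)) (prev x : Int) :
    altStep bs prev x = innerA bs prev x := by
  rw [innerA_eq_findIdx, altStep]
  set fi := bs.findIdx (fun v => decide (prev + x ≤ v)) with hfi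
  have hfile : fi ≤ bs.length := List.findIdx_le_length
  have hbl : bisectLoop bs (prev + x) 0 (bs.length : Int) = (fi : Int) :=
    bisectLoop_eq_findIdx bs hs (prev + x) (bs.length) 0 (bs.length : Int)
      (by omega) (by omega) (by omega) (by omega) (by omega) (by omega)
  by_cases hpx : prev ≤ x
  · rw [if_pos hpx]
    simp only [hbl]
    by_cases hlt : fi < bs.length
    · rw [if_pos (by exact_mod_cast hlt), dif_pos ⟨hpx, hlt⟩,
          PySem.List.pyGetD_natCast, List.getD_eq_getElem _ _ hlt]
    · rw [if_neg (by omega), dif_neg (by tauto)]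
  · rw [if_neg hpx, dif_neg (by tauto)]

-- the "already returned" state is absorbing in B's fold
theorem foldl_none (bs : List Int) (bmax : Int) (rest : List Int) :
    rest.foldl (altAcc bs bmax) (none : Option (Int × Int)) = none := by
  induction rest with
  | nil => rfl
  | cons y t ih => simpa [altAcc] using ih

-- A's outer loop equals B's fold on the sorted list
theorem loopA_eq_foldl (bs : List Int) (hs : bs.Pairwise (· ≤ ·)) (bmax : Int) :
    ∀ (rest : List Int) (p2 p : Int),
      loopA bs bmax p2 p rest = rest.foldl (altAcc bs bmax) (some (p2, p)) := by
  intro rest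
  induction rest with
  | nil => intro p2 p; rfl
  | cons x t ih =>
      intro p2 p
      simp only [loopA, List.foldl_cons, altAcc, Option.isNone_some, Bool.false_eq_true,
                 if_false, Option.getD_some]
      by_cases hc : max x (bmax - x) < p
      · rw [if_pos hc, if_pos hc]
        exact (foldl_none bs bmax t).symm
      · rw [if_neg hc, if_neg hc, ih, altStep_eq_innerA bs hs]

-- ===== VERDICT (by name: the statement is the Claim_ definition above) =====
theorem codeforces_spec : Claim_equal_codeforces := by
  intro n m a b _ _
  unfold Spec_codeforces
  have hs : (PySem.List.sorted b (fun x => x) false).Pairwise (· ≤ ·) :=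
    PySem.List.sorted_pairwise b (fun x => x)
  simp only [codeforces, codeforces_alt]
  cases a with
  | nil => simp
  | cons a0 arest =>
      cases hb : PySem.List.sorted b (fun x => x) false with
      | nil => simp
      | cons b0 bt =>
          rw [hb] at hs
          simp only [List.isEmpty_cons, Bool.false_or, List.headD_cons, List.drop_one,
                     List.tail_cons]
          rw [loopA_eq_foldl _ hs]
          cases hres : (arest.foldl (altAcc (b0 :: bt) (lastA (b0 :: bt)))
              (some (min a0 (b0 - a0), min a0 (b0 - a0)))) with
          | none =>
              simp only [lastA] at hres
              rw [hres]
              simp [lastA]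
          | some pr =>
              simp only [lastA] at hres
              rw [hres]
              simp [lastA]
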